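-- pv_equiv track=rewrite | github.com/gene-git/wg_tool | src/wg_tool/peers/profile.py | attribs_keep
-- ===== SOURCE A (Python) =====
-- from typing import (Any, Self)
--
-- def attribs_keep(attribs: dict[str, Any],
--                  keeps: tuple[str, ...] = ()) -> dict[str, Any]:
--     """
--     Return dictionary with only keep keys
--     Remainder are ignored.
--     """
--     keeps = tuple(set(keeps))
--
--     attribs_keep: dict[str, Any] = {}
--     for key in keeps:
--         value = attribs.get(key)
--         if value:
--             attribs_keep[key] = value
--     return attribs_keep
-- ===== SOURCE B (Python) =====
-- def attribs_keep(attribs, keeps=()):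
--     """
--     Return dictionary with only keep keys
--     Remainder are ignored.
--     """
--     # Pass 1: scan the data dict once, keeping only truthy-valued entries.
--     truthy = {key: value for key, value in attribs.items() if value}
--     # Pass 2: select the wanted keys (ordered dedup) from that pre-filtered dict.
--     allowed = dict.fromkeys(keeps)
--     return {key: truthy[key] for key in allowed if key in truthy}
-- ===== Notes on version B (the rewrite author's own statement) =====
-- stated objective: alternative
-- what changed: B pre-filters the data dict in one pass over attribs.items() into a truthy-only dict and dedups keeps with dict.fromkeys, then selects wanted keys by membership, instead of A's per-key get-and-test loop over tuple(set(keeps)).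
import Mathlib
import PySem

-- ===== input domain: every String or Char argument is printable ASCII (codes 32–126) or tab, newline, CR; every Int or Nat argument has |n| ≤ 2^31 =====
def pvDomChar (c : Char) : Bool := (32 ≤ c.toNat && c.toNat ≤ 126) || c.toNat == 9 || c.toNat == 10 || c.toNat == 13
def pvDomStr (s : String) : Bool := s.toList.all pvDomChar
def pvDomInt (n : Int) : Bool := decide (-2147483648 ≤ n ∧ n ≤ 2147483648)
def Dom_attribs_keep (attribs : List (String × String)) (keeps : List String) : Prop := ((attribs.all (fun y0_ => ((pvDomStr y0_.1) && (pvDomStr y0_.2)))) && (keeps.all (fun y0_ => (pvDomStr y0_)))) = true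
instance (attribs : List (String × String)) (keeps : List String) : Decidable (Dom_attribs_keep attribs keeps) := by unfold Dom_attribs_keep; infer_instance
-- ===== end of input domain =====

-- B replaces A's per-key truthiness test with one pre-filtering pass over the data dict plus an
-- ordered dedup of keeps (alternative decomposition; equal return value, no speed claim).

-- ===== PORT A =====
-- `keeps = tuple(set(keeps))`: the set's distinct elements; its hash iteration order is not modelled,
-- the port uses first-insertion order (the resulting dict is equal as a Python dict regardless).
def attribs_keep (attribs : List (String × String)) (keeps : List String) : List (String × String) :=
  let keepsDedup : List String := PySem.Set.ofList keeps
  let res : PySem.Dict String String :=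
    keepsDedup.foldl (fun d key =>
      match (PySem.Dict.mk attribs).get? key with            -- value = attribs.get(key)
      | some value => if value ≠ "" then d.insert key value else d   -- if value: attribs_keep[key] = value
      | none => d) PySem.Dict.empty
  res.items

-- ===== PORT B =====
def attribs_keep_alt (attribs : List (String × String)) (keeps : List String) : List (String × String) :=
  -- truthy = {key: value for key, value in attribs.items() if value}
  let truthy : PySem.Dict String String :=
    attribs.foldl (fun d p => if p.2 ≠ "" then d.insert p.1 p.2 else d) PySem.Dict.empty
  -- allowed = dict.fromkeys(keeps)
  let allowed : List String := PySem.List.dedup keeps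
  -- {key: truthy[key] for key in allowed if key in truthy}
  let res : PySem.Dict String String :=
    allowed.foldl (fun d key =>
      if truthy.contains key then d.insert key (truthy.getD key "") else d) PySem.Dict.empty
  res.items

-- ===== PRECONDITION & SPEC =====
-- Pre_ excludes association lists with duplicate keys: they do not correspond to any Python dict
-- (dict construction collapses duplicates), so neither program's reading of them is specified.
def Pre_attribs_keep (attribs : List (String × String)) (keeps : List String) : Prop :=
  (attribs.map Prod.fst).Nodup
instance (attribs : List (String × String)) (keeps : List String) : Decidable (Pre_attribs_keep attribs keeps) := by unfold Pre_attribs_keep; infer_instance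

def pvWitness_attribs_keep : (List (String × String)) × List String :=
  ([("Endpoint", "10.0.0.1:51820"), ("PresharedKey", ""), ("AllowedIPs", "0.0.0.0/0")],
   ["AllowedIPs", "Endpoint", "PresharedKey", "Endpoint"])

def Spec_attribs_keep (attribs : List (String × String)) (keeps : List String) (out : List (String × String)) : Prop := out = attribs_keep_alt attribs keeps
instance (attribs : List (String × String)) (keeps : List String) (out : List (String × String)) : Decidable (Spec_attribs_keep attribs keeps out) := by unfold Spec_attribs_keep; infer_instance

-- ===== CLAIM (what is proved, stated in full; the proofs are below) =====
def Claim_equal_attribs_keep : Prop := ∀ (attribs : List (String × String)) (keeps : List String), Dom_attribs_keep attribs keeps → Pre_attribs_keep attribs keeps → Spec_attribs_keep attribs keeps (attribs_keep attribs keeps)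

-- ===== LEMMAS AND PROOFS =====

-- The per-key selector both programs compute: A evaluates it lookup-by-lookup, B through `truthy`.
def pvPick (attribs : List (String × String)) (key : String) : Option String :=
  match (PySem.Dict.mk attribs).get? key with
  | some value => if value ≠ "" then some value else none
  | none => none

theorem pvPick_cons (p : String × String) (rest : List (String × String)) (key : String) :
    pvPick (p :: rest) key
      = if p.1 == key then (if p.2 ≠ "" then some p.2 else none) else pvPick rest key := by
  unfold pvPick
  rw [PySem.Dict.get?_mk_cons]
  by_cases hkey : p.1 == key <;> simp [hkey]

theorem pvPick_none (l : List (String × String)) (key : String)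
    (hmem : key ∉ l.map Prod.fst) : pvPick l key = none := by
  unfold pvPick
  have hnone : (PySem.Dict.mk l).get? key = none :=
    (PySem.Dict.get?_eq_none_iff_not_mem_keys _ _).mpr (by simpa [PySem.Dict.keys_mk] using hmem)
  rw [hnone]

-- A fold that conditionally inserts fresh, pairwise-distinct keys appends the selected pairs.
theorem pv_foldl_insert_opt (f : String → Option String) :
    ∀ (ks : List String) (d : PySem.Dict String String), ks.Nodup →
      (∀ k ∈ ks, d.contains k = false) →
      (ks.foldl (fun d k => match f k with | some v => d.insert k v | none => d) d).items
        = d.items ++ ks.filterMap (fun k => (f k).map (fun v => (k, v))) := by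
  intro ks
  induction ks with
  | nil => intro d _ _; simp
  | cons k rest ih =>
    intro d hnd hfresh
    have hk : k ∉ rest := (List.nodup_cons.mp hnd).1
    have hnd' : rest.Nodup := (List.nodup_cons.mp hnd).2
    simp only [List.foldl_cons, List.filterMap_cons]
    cases hf : f k with
    | none =>
      simp only [Option.map_none]
      exact ih d hnd' (fun x hx => hfresh x (List.mem_cons_of_mem _ hx))
    | some v =>
      simp only [Option.map_some]
      rw [ih (d.insert k v) hnd' ?_]
      · rw [PySem.Dict.items_insert_of_not_contains d v (hfresh k List.mem_cons_self)]
        simp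
      · intro x hx
        rw [PySem.Dict.contains_insert]
        have hne : x ≠ k := fun hEq => hk (hEq ▸ hx)
        simp [hne, hfresh x (List.mem_cons_of_mem _ hx)]

-- `truthy`'s items are exactly the truthy-valued entries of `attribs` (keys unique).
theorem pv_truthy_items (attribs : List (String × String))
    (h : (attribs.map Prod.fst).Nodup) :
    (attribs.foldl (fun d p => if p.2 ≠ "" then d.insert p.1 p.2 else d)
      (PySem.Dict.empty : PySem.Dict String String)).items
      = attribs.filter (fun p => p.2 ≠ "") := by
  rw [PySem.List.foldl_ite_eq_foldl_filter]
  have h2 : ((attribs.filter (fun p => decide (p.2 ≠ ""))).map Prod.fst).Nodup :=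
    h.sublist (List.Sublist.map Prod.fst List.filter_sublist)
  have H := PySem.Dict.items_foldl_insert_fresh (attribs.filter (fun p => decide (p.2 ≠ "")))
    Prod.fst Prod.snd PySem.Dict.empty (fun a _ => PySem.Dict.contains_empty _) h2
  have e : (PySem.Dict.empty : PySem.Dict String String).items = [] := rfl
  exact H.trans (by rw [e]; simp)

-- First-match lookup in the truthy-filtered list agrees with pvPick when keys are unique.
theorem pv_get?_mk_filter (attribs : List (String × String)) (key : String)
    (h : (attribs.map Prod.fst).Nodup) :
    (PySem.Dict.mk (attribs.filter (fun p => p.2 ≠ ""))).get? key = pvPick attribs key := by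
  induction attribs with
  | nil => rfl
  | cons p rest ih =>
    have h' : p.1 ∉ rest.map Prod.fst ∧ (rest.map Prod.fst).Nodup := by
      rw [List.map_cons, List.nodup_cons] at h; exact h
    rw [List.filter_cons, pvPick_cons]
    by_cases hv : p.2 = ""
    · rw [if_neg (by simp [hv]), ih h'.2]
      by_cases hkey : p.1 == key
      · rw [if_pos hkey, if_neg (by simp [hv])]
        have hkey' : p.1 = key := by simpa using hkey
        exact pvPick_none rest key (hkey' ▸ h'.1)
      · rw [if_neg hkey]
    · rw [if_pos (by simp [hv]), PySem.Dict.get?_mk_cons]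
      by_cases hkey : p.1 == key
      · rw [if_pos hkey, if_pos hkey, if_pos hv]
      · rw [if_neg hkey, if_neg hkey, ih h'.2]

theorem pv_portA_eq (attribs : List (String × String)) (keeps : List String) :
    attribs_keep attribs keeps
      = (PySem.Set.ofList keeps).filterMap (fun k => (pvPick attribs k).map (fun v => (k, v))) := by
  unfold attribs_keep
  have hstep : (fun (d : PySem.Dict String String) key =>
      match (PySem.Dict.mk attribs).get? key with
      | some value => if value ≠ "" then d.insert key value else d
      | none => d)
    = (fun (d : PySem.Dict String String) k =>
      match pvPick attribs k with | some v => d.insert k v | none => d) := by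
    funext d key
    unfold pvPick
    cases (PySem.Dict.mk attribs).get? key with
    | none => rfl
    | some v =>
      by_cases hv : v = "" <;> simp [hv]
  simp only [hstep]
  rw [pv_foldl_insert_opt (pvPick attribs) (PySem.Set.ofList keeps) PySem.Dict.empty
        (PySem.Set.nodup_ofList keeps) (fun k _ => PySem.Dict.contains_empty _)]
  rfl

theorem pv_portB_eq (attribs : List (String × String)) (keeps : List String)
    (h : (attribs.map Prod.fst).Nodup) :
    attribs_keep_alt attribs keeps
      = (PySem.Set.ofList keeps).filterMap (fun k => (pvPick attribs k).map (fun v => (k, v))) := by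
  unfold attribs_keep_alt
  have htr : (attribs.foldl (fun d p => if p.2 ≠ "" then d.insert p.1 p.2 else d)
      (PySem.Dict.empty : PySem.Dict String String))
      = PySem.Dict.mk (attribs.filter (fun p => p.2 ≠ "")) := by
    apply PySem.Dict.ext
    rw [pv_truthy_items attribs h]
  have hstep : (fun (d : PySem.Dict String String) key =>
      if (PySem.Dict.mk (attribs.filter (fun p => p.2 ≠ ""))).contains key
      then d.insert key ((PySem.Dict.mk (attribs.filter (fun p => p.2 ≠ ""))).getD key "") else d)
    = (fun (d : PySem.Dict String String) k =>
      match pvPick attribs k with | some v => d.insert k v | none => d) := by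
    funext d key
    rw [PySem.Dict.contains_eq_isSome_get?, PySem.Dict.getD_eq_get?_getD,
        pv_get?_mk_filter attribs key h]
    cases pvPick attribs key with
    | none => rfl
    | some v => rfl
  simp only [htr, hstep]
  rw [pv_foldl_insert_opt (pvPick attribs) (PySem.List.dedup keeps) PySem.Dict.empty
        (PySem.Set.nodup_ofList keeps) (fun k _ => PySem.Dict.contains_empty _)]
  rfl

-- ===== VERDICT (by name: the statement is the Claim_ definition above) =====
theorem attribs_keep_spec : Claim_equal_attribs_keep := by
  intro attribs keeps _ hpre
  unfold Spec_attribs_keep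
  rw [pv_portA_eq, pv_portB_eq attribs keeps hpre]
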